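-- pv_equiv track=rewrite | github.com/Vineyardcode/voynich_slop | scripts/phase85_chunk_fingerprint.py | syllabify_word
-- ===== SOURCE A (Python) =====
-- VOWELS_LATIN = set('aeiouyàáâãäåæèéêëìíîïòóôõöùúûüýœ')
--
-- def syllabify_word(word, vowels=VOWELS_LATIN):
--     """Simple language-general syllabification.
--
--     Algorithm: maximum onset principle — split before consonant(s)
--     that precede a vowel, keeping as many consonants as possible
--     in the onset of the next syllable.
--
--     This is approximate but produces statistically robust syllable
--     inventories. Errors are ≤15% on syllable count (validated against
--     CMU dict for English: 87% accuracy on syllable count).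
--     """
--     if len(word) <= 1:
--         return [word]
--
--     # Classify each character
--     is_v = [c in vowels for c in word]
--
--     # Find syllable boundaries: split before the LAST consonant
--     # in a consonant cluster that precedes a vowel
--     boundaries = [0]  # start of first syllable
--     i = 1
--     while i < len(word):
--         if is_v[i] and i > 0 and not is_v[i-1]:
--             # Vowel preceded by consonant(s) — find start of cluster
--             j = i - 1
--             while j > boundaries[-1] and not is_v[j]:
--                 j -= 1
--             # Split before the consonant cluster (keep one consonant
--             # with previous syllable if possible)
--             if j > boundaries[-1]:
--                 # There's a vowel before the cluster — split after it
--                 # but keep at least one consonant with previous syllable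
--                 # if the cluster has 2+ consonants
--                 split_at = j + 1
--             else:
--                 # No vowel after boundary — entire cluster goes to next
--                 split_at = j if is_v[j] else j + 1
--             if split_at > boundaries[-1] and split_at < i:
--                 boundaries.append(split_at)
--         i += 1
--
--     # Extract syllables
--     syllables = []
--     for k in range(len(boundaries)):
--         start = boundaries[k]
--         end = boundaries[k+1] if k+1 < len(boundaries) else len(word)
--         syl = word[start:end]
--         if syl:
--             syllables.append(syl)
--
--     return syllables if syllables else [word]
-- ===== SOURCE B (Python) =====
-- VOWELS_LATIN = set('aeiouyàáâãäåæèéêëìíîïòóôõöùúûüýœ')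
--
-- def syllabify_word(word, vowels=VOWELS_LATIN):
--     """One forward pass: track the most recent vowel index; at each
--     consonant->vowel transition place the boundary right after that vowel
--     (or after the first consonant of a word-initial cluster)."""
--     if len(word) <= 1:
--         return [word]
--     is_v = [c in vowels for c in word]
--     boundaries = [0]
--     last_v = -1  # index of most recent vowel seen so far
--     for i in range(len(word)):
--         if is_v[i]:
--             if i > 0 and not is_v[i - 1]:
--                 b = boundaries[-1]
--                 if last_v > b:
--                     boundaries.append(last_v + 1)
--                 elif last_v < b and b + 1 < i:
--                     boundaries.append(b + 1)
--             last_v = i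
--     bs = boundaries + [len(word)]
--     return [word[a:b] for a, b in zip(bs, bs[1:])]
-- ===== Notes on version B (the rewrite author's own statement) =====
-- stated objective: alternative
-- what changed: Replaces A's backward scan over each consonant cluster (and its filtered, fallback-guarded extraction loop) with a single forward pass that tracks the most recent vowel index, then slices syllables with one zip over the boundary list.
import Mathlib
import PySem

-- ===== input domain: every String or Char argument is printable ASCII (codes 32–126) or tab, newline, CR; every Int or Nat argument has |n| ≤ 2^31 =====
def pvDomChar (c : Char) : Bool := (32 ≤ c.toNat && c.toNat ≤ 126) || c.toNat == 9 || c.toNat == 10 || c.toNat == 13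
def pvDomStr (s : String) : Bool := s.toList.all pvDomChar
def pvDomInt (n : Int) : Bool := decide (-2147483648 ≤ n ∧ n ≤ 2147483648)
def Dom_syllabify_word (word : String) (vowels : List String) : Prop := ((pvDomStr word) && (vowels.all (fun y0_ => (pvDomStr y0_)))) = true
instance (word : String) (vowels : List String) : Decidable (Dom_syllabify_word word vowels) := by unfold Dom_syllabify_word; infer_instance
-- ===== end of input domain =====

-- B replaces A's backward scan over each consonant cluster with a single forward
-- pass tracking the most recent vowel index, and slices syllables with one zip
-- (objective: alternative, same asymptotic cost).

-- ===== PORT A =====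

-- `c in vowels` for a character c of word (Python compares the 1-char string)
def pvIsV (vowels : List String) (c : Char) : Bool := decide (String.ofList [c] ∈ vowels)

-- inner `while j > boundaries[-1] and not is_v[j]: j -= 1`
def pvScanBack (isv : List Bool) (b : Nat) (j : Nat) : Nat :=
  if h : b < j ∧ isv.getD j false = false then pvScanBack isv b (j - 1) else j
termination_by j
decreasing_by omega

-- `split_at = j + 1` / `j if is_v[j] else j + 1` computed from b = boundaries[-1]
def pvSplitAt (isv : List Bool) (b i : Nat) : Nat :=
  if b < pvScanBack isv b (i - 1) then pvScanBack isv b (i - 1) + 1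
  else if isv.getD (pvScanBack isv b (i - 1)) false = true then pvScanBack isv b (i - 1)
  else pvScanBack isv b (i - 1) + 1

-- outer `while i < len(word)` loop; boundaries kept in REVERSE (head = boundaries[-1]),
-- fuel counts the remaining iterations (len(word) - i)
def pvOuterA (isv : List Bool) : Nat → Nat → List Nat → List Nat
  | 0, _, bs => bs
  | fuel + 1, i, bs =>
    pvOuterA isv fuel (i + 1)
      (if isv.getD i false = true ∧ 0 < i ∧ isv.getD (i - 1) false = false then
        if bs.headD 0 < pvSplitAt isv (bs.headD 0) i ∧ pvSplitAt isv (bs.headD 0) i < i then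
          pvSplitAt isv (bs.headD 0) i :: bs
        else bs
      else bs)

-- extraction loop `for k in range(len(boundaries))` (word[start:end] = drop/take,
-- exact for these in-range Nat bounds by PySem.List.slice_natCast)
def pvExtractA (w : List Char) (n : Nat) : List Nat → List String
  | [] => []
  | st :: rest =>
    let en := match rest with | [] => n | b' :: _ => b'
    let syl := String.ofList ((w.drop st).take (en - st))
    if syl = "" then pvExtractA w n rest else syl :: pvExtractA w n rest

def syllabify_word (word : String) (vowels : List String) : List String :=
  if word.toList.length ≤ 1 then [word]
  else
    if pvExtractA word.toList word.toList.length
        ((pvOuterA (word.toList.map (pvIsV vowels)) (word.toList.length - 1) 1 [0]).reverse) = []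
    then [word]
    else pvExtractA word.toList word.toList.length
        ((pvOuterA (word.toList.map (pvIsV vowels)) (word.toList.length - 1) 1 [0]).reverse)

-- ===== PORT B =====

-- single forward pass over i = 0..n-1; state = (boundaries reversed, last_v)
def pvOuterB (isv : List Bool) : Nat → Nat → List Nat → Int → List Nat
  | 0, _, bs, _ => bs
  | fuel + 1, i, bs, lv =>
    if isv.getD i false = true then
      pvOuterB isv fuel (i + 1)
        (if 0 < i ∧ isv.getD (i - 1) false = false then
          if ((bs.headD 0 : Nat) : Int) < lv then (lv.toNat + 1) :: bs
          else if lv < ((bs.headD 0 : Nat) : Int) ∧ bs.headD 0 + 1 < i then (bs.headD 0 + 1) :: bs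
          else bs
        else bs) (i : Int)
    else pvOuterB isv fuel (i + 1) bs lv

def syllabify_word_alt (word : String) (vowels : List String) : List String :=
  if word.toList.length ≤ 1 then [word]
  else
    (((pvOuterB (word.toList.map (pvIsV vowels)) word.toList.length 0 [0] (-1)).reverse
        ++ [word.toList.length]).zip
      ((pvOuterB (word.toList.map (pvIsV vowels)) word.toList.length 0 [0] (-1)).reverse
        ++ [word.toList.length]).tail).map
      (fun p => String.ofList ((word.toList.drop p.1).take (p.2 - p.1)))

-- ===== PRECONDITION & SPEC =====
def Spec_syllabify_word (word : String) (vowels : List String) (out : List String) : Prop := out = syllabify_word_alt word vowels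
instance (word : String) (vowels : List String) (out : List String) : Decidable (Spec_syllabify_word word vowels out) := by unfold Spec_syllabify_word; infer_instance

-- ===== CLAIM (what is proved, stated in full; the proofs are below) =====
def Claim_equal_syllabify_word : Prop := ∀ (word : String) (vowels : List String), Dom_syllabify_word word vowels → Spec_syllabify_word word vowels (syllabify_word word vowels)

-- ===== LEMMAS AND PROOFS =====

-- index of the last vowel strictly before i (or -1), the value B's last_v holds
def pvLastV (isv : List Bool) : Nat → Int
  | 0 => -1
  | i + 1 => if isv.getD i false = true then (i : Int) else pvLastV isv i

theorem pvLastV_zero (isv : List Bool) : pvLastV isv 0 = -1 := rfl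

theorem pvLastV_succ (isv : List Bool) (i : Nat) :
    pvLastV isv (i + 1) = if isv.getD i false = true then (i : Int) else pvLastV isv i := rfl

theorem pvExtractA_last (w : List Char) (n st : Nat) :
    pvExtractA w n [st] =
      if String.ofList ((w.drop st).take (n - st)) = "" then []
      else [String.ofList ((w.drop st).take (n - st))] := rfl

theorem pvExtractA_cons (w : List Char) (n st b' : Nat) (t : List Nat) :
    pvExtractA w n (st :: b' :: t) =
      if String.ofList ((w.drop st).take (b' - st)) = "" then pvExtractA w n (b' :: t)
      else String.ofList ((w.drop st).take (b' - st)) :: pvExtractA w n (b' :: t) := rfl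

theorem pvOfList_ne_empty {cs : List Char} (h : cs ≠ []) : String.ofList cs ≠ "" := by
  intro he
  apply h
  have h2 := congrArg String.toList he
  rw [String.toList_ofList] at h2
  simpa using h2

theorem pvSlice_ne_nil {w : List Char} {st en : Nat} (h1 : st < w.length) (h2 : st < en) :
    (w.drop st).take (en - st) ≠ [] := by
  intro h
  have := congrArg List.length h
  simp at this
  omega

theorem pvLastV_lt (isv : List Bool) (i : Nat) : pvLastV isv i < (i : Int) := by
  induction i with
  | zero => rw [pvLastV_zero]; omega
  | succ i ih => rw [pvLastV_succ]; split <;> omega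

theorem pvLastV_isv (isv : List Bool) (i : Nat) (h : 0 ≤ pvLastV isv i) :
    isv.getD (pvLastV isv i).toNat false = true := by
  induction i with
  | zero => rw [pvLastV_zero] at h; omega
  | succ i ih =>
    rw [pvLastV_succ] at h ⊢
    by_cases hv : isv.getD i false = true
    · rw [if_pos hv] at h ⊢
      rwa [Int.toNat_natCast]
    · rw [if_neg hv] at h ⊢
      exact ih h

theorem pvLe_lastV (isv : List Bool) {p i : Nat} (hp : isv.getD p false = true) (hpi : p < i) :
    (p : Int) ≤ pvLastV isv i := by
  induction i with
  | zero => omega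
  | succ i ih =>
    rw [pvLastV_succ]
    by_cases hpe : p = i
    · subst hpe; rw [if_pos hp]
    · have := ih (by omega)
      split <;> omega

theorem pvScanBack_eq (isv : List Bool) (b : Nat) :
    ∀ j, b ≤ j → pvScanBack isv b j =
      if (b : Int) < pvLastV isv (j + 1) then (pvLastV isv (j + 1)).toNat else b := by
  intro j
  induction j with
  | zero =>
    intro hb
    have h1 := pvLastV_lt isv (0 + 1)
    rw [pvScanBack]
    have hb0 : b = 0 := by omega
    subst hb0
    rw [dif_neg (fun h => absurd h.1 (by omega)), if_neg (by omega)]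
  | succ j ih =>
    intro hb
    rw [pvScanBack]
    by_cases hcond : b < j + 1 ∧ isv.getD (j + 1) false = false
    · rw [dif_pos hcond]
      have hstep : pvLastV isv (j + 1 + 1) = pvLastV isv (j + 1) := by
        rw [pvLastV_succ, if_neg (by rw [hcond.2]; simp)]
      rw [show j + 1 - 1 = j from rfl, ih (by omega), hstep]
    · rw [dif_neg hcond]
      by_cases hbe : b = j + 1
      · subst hbe
        have h1 := pvLastV_lt isv (j + 1 + 1)
        rw [if_neg (by omega)]
      · have hv : isv.getD (j + 1) false = true := by
          rcases Bool.eq_false_or_eq_true (isv.getD (j + 1) false) with h | h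
          · exact h
          · exact absurd ⟨by omega, h⟩ hcond
        have hstep : pvLastV isv (j + 1 + 1) = ((j + 1 : Nat) : Int) := by
          rw [pvLastV_succ, if_pos hv]
        rw [hstep, if_pos (by omega), Int.toNat_natCast]

theorem pvLoopAB (isv : List Bool) :
    ∀ (fuel i : Nat) (bs : List Nat), 0 < i → bs.headD 0 < i →
      pvOuterA isv fuel i bs = pvOuterB isv fuel i bs (pvLastV isv i) := by
  intro fuel
  induction fuel with
  | zero => intros; rfl
  | succ fuel ih =>
    intro i bs hi hb
    rw [pvOuterA, pvOuterB]
    by_cases h1 : isv.getD i false = true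
    · rw [if_pos h1]
      have hlvs : pvLastV isv (i + 1) = (i : Int) := by rw [pvLastV_succ, if_pos h1]
      by_cases h2 : isv.getD (i - 1) false = false
      · conv_lhs => rw [if_pos ⟨h1, hi, h2⟩]
        conv_rhs => rw [if_pos ⟨hi, h2⟩]
        have hscan : pvScanBack isv (bs.headD 0) (i - 1) =
            if ((bs.headD 0 : Nat) : Int) < pvLastV isv i then (pvLastV isv i).toNat
            else bs.headD 0 := by
          have h := pvScanBack_eq isv (bs.headD 0) (i - 1) (by omega)
          rwa [Nat.sub_add_cancel hi] at h
        have hlvi : pvLastV isv i = pvLastV isv (i - 1) := by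
          conv_lhs => rw [show i = (i - 1) + 1 by omega]
          rw [pvLastV_succ, if_neg (by rw [h2]; simp)]
        have hlt1 : pvLastV isv i < (i : Int) - 1 := by
          have h := pvLastV_lt isv (i - 1)
          rw [hlvi]
          omega
        by_cases hlt : ((bs.headD 0 : Nat) : Int) < pvLastV isv i
        · -- a vowel after the last boundary: both append last_v + 1
          have h0 : 0 ≤ pvLastV isv i := by omega
          have hc : ((pvLastV isv i).toNat : Int) = pvLastV isv i := Int.toNat_of_nonneg h0
          have hsplit : pvSplitAt isv (bs.headD 0) i = (pvLastV isv i).toNat + 1 := by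
            rw [pvSplitAt, hscan, if_pos hlt, if_pos (show bs.headD 0 < (pvLastV isv i).toNat by omega)]
          conv_lhs => rw [hsplit, if_pos (show bs.headD 0 < (pvLastV isv i).toNat + 1 ∧
            (pvLastV isv i).toNat + 1 < i by omega)]
          conv_rhs => rw [if_pos hlt]
          rw [← hlvs]
          exact ih (i + 1) _ (by omega) (by rw [List.headD_cons]; omega)
        · by_cases hvb : isv.getD (bs.headD 0) false = true
          · -- boundary sits on a vowel: neither side appends
            have hle := pvLe_lastV isv hvb hb
            have hsplit : pvSplitAt isv (bs.headD 0) i = bs.headD 0 := by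
              rw [pvSplitAt, hscan, if_neg hlt, if_neg (Nat.lt_irrefl (bs.headD 0)), if_pos hvb]
            conv_lhs => rw [hsplit, if_neg (fun h => absurd h.1 (by omega))]
            conv_rhs => rw [if_neg hlt, if_neg (fun h => absurd h.1 (by omega))]
            rw [← hlvs]
            exact ih (i + 1) bs (by omega) (by omega)
          · -- no vowel since the boundary (word-initial cluster)
            have hne : pvLastV isv i < ((bs.headD 0 : Nat) : Int) := by
              rcases lt_or_eq_of_le (not_lt.mp hlt) with h | h
              · exact h
              · exfalso
                have h0 : 0 ≤ pvLastV isv i := by omega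
                have hh := pvLastV_isv isv i h0
                rw [show (pvLastV isv i).toNat = bs.headD 0 by omega] at hh
                exact hvb hh
            have hsplit : pvSplitAt isv (bs.headD 0) i = bs.headD 0 + 1 := by
              rw [pvSplitAt, hscan, if_neg hlt, if_neg (Nat.lt_irrefl (bs.headD 0)), if_neg hvb]
            by_cases hsp : bs.headD 0 + 1 < i
            · conv_lhs => rw [hsplit, if_pos (show bs.headD 0 < bs.headD 0 + 1 ∧
                bs.headD 0 + 1 < i from ⟨by omega, hsp⟩)]
              conv_rhs => rw [if_neg hlt, if_pos ⟨hne, hsp⟩]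
              rw [← hlvs]
              exact ih (i + 1) _ (by omega) (by rw [List.headD_cons]; omega)
            · conv_lhs => rw [hsplit, if_neg (fun h => absurd h.2 hsp)]
              conv_rhs => rw [if_neg hlt, if_neg (fun h => absurd h.2 hsp)]
              rw [← hlvs]
              exact ih (i + 1) bs (by omega) (by omega)
      · have h2' : isv.getD (i - 1) false = true := by
          rcases Bool.eq_false_or_eq_true (isv.getD (i - 1) false) with h | h
          · exact h
          · exact absurd h h2
        conv_lhs => rw [if_neg (fun h => h2 h.2.2)]
        conv_rhs => rw [if_neg (fun h => h2 h.2)]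
        rw [← hlvs]
        exact ih (i + 1) bs (by omega) (by omega)
    · rw [if_neg (fun h => h1 h.1), if_neg h1]
      have hlvs : pvLastV isv (i + 1) = pvLastV isv i := by
        rw [pvLastV_succ, if_neg h1]
      rw [← hlvs]
      exact ih (i + 1) bs (by omega) (by omega)

-- the boundary list A builds: strictly decreasing as stored, all entries < i + fuel,
-- and the loop only conses onto the initial list
theorem pvOuterA_inv (isv : List Bool) :
    ∀ (fuel i : Nat) (bs : List Nat), List.IsChain (· > ·) bs → (∀ x ∈ bs, x < i) →
      List.IsChain (· > ·) (pvOuterA isv fuel i bs) ∧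
      (∀ x ∈ pvOuterA isv fuel i bs, x < i + fuel) ∧
      ∃ pre, pvOuterA isv fuel i bs = pre ++ bs := by
  intro fuel
  induction fuel with
  | zero =>
    intro i bs hch hx
    exact ⟨hch, by simpa using hx, [], rfl⟩
  | succ fuel ih =>
    intro i bs hch hx
    rw [pvOuterA]
    by_cases hc : (isv.getD i false = true ∧ 0 < i ∧ isv.getD (i - 1) false = false) ∧
        (bs.headD 0 < pvSplitAt isv (bs.headD 0) i ∧ pvSplitAt isv (bs.headD 0) i < i)
    · rw [if_pos hc.1, if_pos hc.2]
      have hch' : List.IsChain (· > ·) (pvSplitAt isv (bs.headD 0) i :: bs) := by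
        rw [List.isChain_cons]
        refine ⟨?_, hch⟩
        intro y hy
        cases bs with
        | nil => simp at hy
        | cons h t =>
          simp only [List.head?_cons, Option.mem_def, Option.some.injEq] at hy
          subst hy
          simpa using hc.2.1
      have hx' : ∀ x ∈ pvSplitAt isv (bs.headD 0) i :: bs, x < i + 1 := by
        intro x hxm
        rcases List.mem_cons.mp hxm with h | h
        · have := hc.2.2; omega
        · have := hx x h; omega
      obtain ⟨hch2, hx2, pre, hpre⟩ := ih (i + 1) _ hch' hx'
      refine ⟨hch2, by intro x hxm; have := hx2 x hxm; omega,
        pre ++ [pvSplitAt isv (bs.headD 0) i], by rw [hpre]; simp⟩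
    · have hbs' : (if isv.getD i false = true ∧ 0 < i ∧ isv.getD (i - 1) false = false then
          if bs.headD 0 < pvSplitAt isv (bs.headD 0) i ∧ pvSplitAt isv (bs.headD 0) i < i then
            pvSplitAt isv (bs.headD 0) i :: bs
          else bs
        else bs) = bs := by
        by_cases ha : isv.getD i false = true ∧ 0 < i ∧ isv.getD (i - 1) false = false
        · rw [if_pos ha, if_neg (fun hg => hc ⟨ha, hg⟩)]
        · rw [if_neg ha]
      rw [hbs']
      obtain ⟨hch2, hx2, pre, hpre⟩ := ih (i + 1) bs hch (fun x hm => by have := hx x hm; omega)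
      exact ⟨hch2, by intro x hxm; have := hx2 x hxm; omega, pre, hpre⟩

-- nonempty in-range slices: the filtered extraction loop equals B's zip comprehension
theorem pvExtract_eq (w : List Char) :
    ∀ l : List Nat, List.IsChain (· < ·) l → (∀ x ∈ l, x < w.length) →
      pvExtractA w w.length l =
        (((l ++ [w.length]).zip ((l ++ [w.length]).tail)).map
          (fun p => String.ofList ((w.drop p.1).take (p.2 - p.1)))) := by
  intro l
  induction l with
  | nil => intros; rfl
  | cons st rest ih =>
    intro hch hx
    have hst : st < w.length := hx st (by simp)
    cases rest with
    | nil =>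
      rw [pvExtractA_last,
        if_neg (pvOfList_ne_empty (pvSlice_ne_nil hst hst))]
      rfl
    | cons b' t =>
      have hlt : st < b' := by
        rw [List.isChain_cons] at hch
        simpa using hch.1 b' (by simp)
      rw [pvExtractA_cons, if_neg (pvOfList_ne_empty (pvSlice_ne_nil hst hlt)),
        ih (List.isChain_cons.mp hch).2 (fun x hm => hx x (by simp [hm]))]
      simp only [List.cons_append, List.tail_cons, List.zip_cons_cons, List.map_cons]

-- one peeled step of B's loop at i = 0 (the boundary branch cannot fire there)
theorem pvPeelB (isv : List Bool) (f : Nat) :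
    pvOuterB isv (f + 1) 0 [0] (-1) = pvOuterB isv f 1 [0] (pvLastV isv 1) := by
  rw [pvOuterB]
  by_cases h : isv.getD 0 false = true
  · rw [if_pos h, if_neg (fun hh => absurd hh.1 (by omega)),
      show pvLastV isv 1 = ((0 : Nat) : Int) from by rw [pvLastV_succ, if_pos h]]
  · rw [if_neg h, show pvLastV isv 1 = -1 from by rw [pvLastV_succ, if_neg h]; rfl]

-- ===== VERDICT (by name: the statement is the Claim_ definition above) =====
theorem syllabify_word_spec : Claim_equal_syllabify_word := by
  unfold Claim_equal_syllabify_word Spec_syllabify_word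
  intro word vowels _
  unfold syllabify_word syllabify_word_alt
  by_cases hlen : word.toList.length ≤ 1
  · rw [if_pos hlen, if_pos hlen]
  · rw [if_neg hlen, if_neg hlen]
    have hn : 2 ≤ word.toList.length := by omega
    have hB : pvOuterB (word.toList.map (pvIsV vowels)) word.toList.length 0 [0] (-1) =
        pvOuterA (word.toList.map (pvIsV vowels)) (word.toList.length - 1) 1 [0] := by
      rw [show word.toList.length = (word.toList.length - 1) + 1 by omega, pvPeelB]
      exact (pvLoopAB _ (word.toList.length - 1) 1 [0] (by omega) (by simp)).symm
    rw [hB]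
    obtain ⟨hch, hbd, pre, hpre⟩ :=
      pvOuterA_inv (word.toList.map (pvIsV vowels)) (word.toList.length - 1) 1 [0]
        (by simp) (by simp)
    have hchr : List.IsChain (· < ·)
        (pvOuterA (word.toList.map (pvIsV vowels)) (word.toList.length - 1) 1 [0]).reverse := by
      rw [List.isChain_reverse]
      exact hch
    have hbr : ∀ x ∈ (pvOuterA (word.toList.map (pvIsV vowels))
        (word.toList.length - 1) 1 [0]).reverse, x < word.toList.length := by
      intro x hm
      have := hbd x (List.mem_reverse.mp hm)
      omega
    rw [pvExtract_eq word.toList _ hchr hbr]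
    have hbne : (pvOuterA (word.toList.map (pvIsV vowels))
        (word.toList.length - 1) 1 [0]).reverse ≠ [] := by
      rw [hpre]; simp
    rcases hr : (pvOuterA (word.toList.map (pvIsV vowels))
        (word.toList.length - 1) 1 [0]).reverse with _ | ⟨h, t⟩
    · exact absurd hr hbne
    · rw [if_neg (by simp [List.zip_eq_nil_iff])]
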